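-- pv_equiv track=rewrite | github.com/GarrettXUPT/boolean_fuction | interface/RSBF.py | NineTruthTable
-- ===== SOURCE A (Python) =====
-- def itemRes(dic_index, dic_value):
--     for key in dic_value.keys():
--         if dic_value.get(key) != dic_index.get(key):
--             return 0
--     return 1
--
-- def NineTruthTable(dicIndexList):
--     resList = []
--     hang = len(dicIndexList)
--     dic_value = {0 : 0, 1 : 0, 2 : 0, 3 : 0, 4 : 0, 5 : 0, 6 : 0, 7 : 0, 8 : 0}
--     for i1 in range(0, 2):
--         for i2 in range(0, 2):
--             for i3 in range(0, 2):
--                 for i4 in range(0, 2):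
--                     for i5 in range(0, 2):
--                         for i6 in range(0, 2):
--                             for i7 in range(0, 2):
--                                 for i8 in range(0, 2):
--                                     for i9 in range(0, 2):
--                                         dic_value[0] = i1
--                                         dic_value[1] = i2
--                                         dic_value[2] = i3
--                                         dic_value[3] = i4
--                                         dic_value[4] = i5
--                                         dic_value[5] = i6
--                                         dic_value[6] = i7
--                                         dic_value[7] = i8
--                                         dic_value[8] = i9
--                                         resTmpList = []
--                                         for i in range(0, hang):
--                                             resTmpList.append(itemRes(dicIndexList[i], dic_value))
--                                         resList.append(sum(resTmpList) % 2)
--     return resList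
-- ===== SOURCE B (Python) =====
-- def entryIndex(dic):
--     # big-endian index of the entry's 9-bit assignment, or None if any key 0..8
--     # is missing or holds a non-bit value
--     idx = 0
--     for k in range(9):
--         v = dic.get(k)
--         if v == 0:
--             idx = 2 * idx
--         elif v == 1:
--             idx = 2 * idx + 1
--         else:
--             return None
--     return idx
--
-- def NineTruthTable(dicIndexList):
--     counts = [0] * 512
--     for dic in dicIndexList:
--         idx = entryIndex(dic)
--         if idx is not None:
--             counts[idx] += 1
--     return [c % 2 for c in counts]
-- ===== Notes on version B (the rewrite author's own statement) =====
-- stated objective: faster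
-- what changed: A enumerates all 512 bit assignments in nine nested loops and rescans the whole entry list for each one; B makes a single pass over the entries, computing each entry's 9-bit big-endian index into a 512-slot histogram, then takes each counter mod 2.
import Mathlib
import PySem

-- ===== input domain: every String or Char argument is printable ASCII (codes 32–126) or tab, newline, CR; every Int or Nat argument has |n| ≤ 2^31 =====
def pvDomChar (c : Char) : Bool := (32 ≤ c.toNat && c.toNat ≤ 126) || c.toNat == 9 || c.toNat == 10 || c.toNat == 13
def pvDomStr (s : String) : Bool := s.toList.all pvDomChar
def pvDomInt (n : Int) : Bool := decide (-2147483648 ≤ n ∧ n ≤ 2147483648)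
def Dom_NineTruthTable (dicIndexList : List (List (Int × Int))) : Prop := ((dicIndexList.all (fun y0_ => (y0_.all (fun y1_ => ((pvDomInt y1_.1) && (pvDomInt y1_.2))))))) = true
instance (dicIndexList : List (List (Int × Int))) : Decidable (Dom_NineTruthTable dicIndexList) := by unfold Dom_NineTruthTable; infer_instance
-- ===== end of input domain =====

-- B replaces A's 512 nested assignment loops (each rescanning the whole list) by one histogram
-- pass over the entries followed by one parity pass over the 512 counters.

-- ===== PORT A =====
-- itemRes: the 'for key in dic_value.keys(): … return 0 / return 1' loop, early return = recursion
def itemResGo (dic_index dic_value : PySem.Dict Int Int) : List Int → Int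
  | [] => 1
  | k :: ks => if dic_value.get? k ≠ dic_index.get? k then 0 else itemResGo dic_index dic_value ks

def itemRes (dic_index dic_value : PySem.Dict Int Int) : Int :=
  itemResGo dic_index dic_value dic_value.keys

-- dic_value has all nine keys reassigned at the start of every innermost iteration, so its value
-- there does not depend on the previous iteration; the port therefore rebuilds it from the initial
-- dict instead of threading the object — every intermediate dict value is identical to Python's.
def NineTruthTable (dicIndexList : List (List (Int × Int))) : List Int :=
  let hang : Int := (dicIndexList.length : Int)
  let dv0 : PySem.Dict Int Int :=
    PySem.Dict.mk [(0,0),(1,0),(2,0),(3,0),(4,0),(5,0),(6,0),(7,0),(8,0)]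
  (PySem.List.pyRange 0 2 1).foldl (fun resList i1 =>
   (PySem.List.pyRange 0 2 1).foldl (fun resList i2 =>
    (PySem.List.pyRange 0 2 1).foldl (fun resList i3 =>
     (PySem.List.pyRange 0 2 1).foldl (fun resList i4 =>
      (PySem.List.pyRange 0 2 1).foldl (fun resList i5 =>
       (PySem.List.pyRange 0 2 1).foldl (fun resList i6 =>
        (PySem.List.pyRange 0 2 1).foldl (fun resList i7 =>
         (PySem.List.pyRange 0 2 1).foldl (fun resList i8 =>
          (PySem.List.pyRange 0 2 1).foldl (fun resList i9 =>
            let dic_value := ((((((((dv0.insert 0 i1).insert 1 i2).insert 2 i3).insert 3 i4).insert 4 i5).insert 5 i6).insert 6 i7).insert 7 i8).insert 8 i9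
            let resTmpList : List Int :=
              (PySem.List.pyRange 0 hang 1).foldl
                (fun acc i => acc ++ [itemRes (PySem.Dict.mk (PySem.List.pyGetD dicIndexList i [])) dic_value]) []
            resList ++ [PySem.Int.mod resTmpList.sum 2])
          resList) resList) resList) resList) resList) resList) resList) resList) []

-- ===== PORT B =====
-- entryIndex: the 'for k in range(9)' loop of Source B; 'return None' = the none branches
def entryIndexGo (dic : PySem.Dict Int Int) (idx : Int) : List Int → Option Int
  | [] => some idx
  | k :: ks =>
    match dic.get? k with
    | some 0 => entryIndexGo dic (2 * idx) ks
    | some 1 => entryIndexGo dic (2 * idx + 1) ks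
    | _ => none

def entryIndex (dic : PySem.Dict Int Int) : Option Int :=
  entryIndexGo dic 0 (PySem.List.pyRange 0 9 1)

def NineTruthTable_alt (dicIndexList : List (List (Int × Int))) : List Int :=
  let counts : List Int :=
    dicIndexList.foldl (fun counts dic =>
      match entryIndex (PySem.Dict.mk dic) with
      | some idx => counts.set idx.toNat (counts.getD idx.toNat 0 + 1)  -- counts[idx] += 1, idx ∈ [0,512)
      | none => counts) (List.replicate 512 0)
  counts.map (fun c => PySem.Int.mod c 2)

-- ===== PRECONDITION & SPEC =====
def Spec_NineTruthTable (dicIndexList : List (List (Int × Int))) (out : List Int) : Prop := out = NineTruthTable_alt dicIndexList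
instance (dicIndexList : List (List (Int × Int))) (out : List Int) : Decidable (Spec_NineTruthTable dicIndexList out) := by unfold Spec_NineTruthTable; infer_instance

-- ===== CLAIM (what is proved, stated in full; the proofs are below) =====
def Claim_equal_NineTruthTable : Prop := ∀ (dicIndexList : List (List (Int × Int))), Dom_NineTruthTable dicIndexList → Spec_NineTruthTable dicIndexList (NineTruthTable dicIndexList)

-- ===== LEMMAS AND PROOFS =====

-- all 0/1-lists of length k, in A's enumeration order (first loop variable = most significant)
def bitLists : Nat → List (List Int)
  | 0 => [[]]
  | n+1 => ([0,1] : List Int).flatMap (fun b => (bitLists n).map (fun bs => b :: bs))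

-- the dict A builds for the assignment bs, and its big-endian index
def dvOf (bs : List Int) : PySem.Dict Int Int :=
  PySem.Dict.mk [(0, bs.getD 0 0),(1, bs.getD 1 0),(2, bs.getD 2 0),(3, bs.getD 3 0),
    (4, bs.getD 4 0),(5, bs.getD 5 0),(6, bs.getD 6 0),(7, bs.getD 7 0),(8, bs.getD 8 0)]

def idxOf (bs : List Int) : Int := bs.foldl (fun a b => 2 * a + b) 0

lemma flatMap_sing {α β : Type} (l : List α) (f : α → β) :
    l.flatMap (fun x => [f x]) = l.map f := by
  induction l with
  | nil => rfl
  | cons a l ih => simp [List.flatMap_cons, ih]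

lemma dvOf_cons (i1 i2 i3 i4 i5 i6 i7 i8 i9 : Int) :
    dvOf [i1,i2,i3,i4,i5,i6,i7,i8,i9]
      = PySem.Dict.mk [(0,i1),(1,i2),(2,i3),(3,i4),(4,i5),(5,i6),(6,i7),(7,i8),(8,i9)] := by
  rfl

set_option maxHeartbeats 1600000 in
lemma dv_chain (i1 i2 i3 i4 i5 i6 i7 i8 i9 : Int) :
    ((((((((((PySem.Dict.mk [((0:Int),(0:Int)),(1,0),(2,0),(3,0),(4,0),(5,0),(6,0),(7,0),(8,0)]).insert 0 i1).insert 1 i2).insert 2 i3).insert 3 i4).insert 4 i5).insert 5 i6).insert 6 i7).insert 7 i8).insert 8 i9)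
      = PySem.Dict.mk [(0,i1),(1,i2),(2,i3),(3,i4),(4,i5),(5,i6),(6,i7),(7,i8),(8,i9)] := by
  rfl

set_option maxRecDepth 4000 in
lemma A_eq_map (l : List (List (Int × Int))) :
    NineTruthTable l = (bitLists 9).map (fun bs =>
      PySem.Int.mod ((PySem.List.pyRange 0 (l.length : Int) 1).foldl
        (fun acc i => acc ++ [itemRes (PySem.Dict.mk (PySem.List.pyGetD l i [])) (dvOf bs)]) []).sum 2) := by
  have h01 : PySem.List.pyRange 0 2 1 = [0,1] := by decide
  simp only [NineTruthTable, h01, dv_chain, PySem.List.foldl_append_singleton_eq_map,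
    PySem.List.foldl_append_eq_flatMap, bitLists, List.map_flatMap, List.map_map,
    List.nil_append]
  simp only [List.map_cons, List.map_nil, Function.comp_apply, dvOf_cons, flatMap_sing]


lemma A_eq_map2 (l : List (List (Int × Int))) :
    NineTruthTable l = (bitLists 9).map (fun bs =>
      PySem.Int.mod (l.map (fun e => itemRes (PySem.Dict.mk e) (dvOf bs))).sum 2) := by
  rw [A_eq_map]
  apply List.map_congr_left
  intro bs _
  rw [PySem.List.foldl_pyRange_zero_pyGetD' l ([] : List (Int × Int))
        (fun acc v => acc ++ [itemRes (PySem.Dict.mk v) (dvOf bs)]) ([] : List Int),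
      PySem.List.foldl_append_singleton_eq_map, List.nil_append]

lemma itemResGo_eq (dI dV : PySem.Dict Int Int) (ks : List Int) :
    itemResGo dI dV ks = if ks.all (fun k => dV.get? k == dI.get? k) then 1 else 0 := by
  induction ks with
  | nil => rfl
  | cons k ks ih =>
    by_cases h : dV.get? k = dI.get? k <;> simp [itemResGo, h, ih]

-- B's entryIndexGo succeeds exactly on matching bit assignments
lemma eiGo_match (d : PySem.Dict Int Int) (ks bs : List Int)
    (h : List.Forall₂ (fun k b => d.get? k = some b ∧ (b = 0 ∨ b = 1)) ks bs) :
    ∀ a : Int, entryIndexGo d a ks = some (bs.foldl (fun x b => 2 * x + b) a) := by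
  induction h with
  | nil => intro a; rfl
  | cons hkb htl ih =>
    intro a
    obtain ⟨hget, hb⟩ := hkb
    rcases hb with rfl | rfl
    · simp only [entryIndexGo, hget, List.foldl_cons]
      rw [ih]
      norm_num
    · simp only [entryIndexGo, hget, List.foldl_cons]
      rw [ih]

lemma eiGo_some (d : PySem.Dict Int Int) :
    ∀ (ks : List Int) (a m : Int), entryIndexGo d a ks = some m →
      ∃ bs, List.Forall₂ (fun k b => d.get? k = some b ∧ (b = 0 ∨ b = 1)) ks bs ∧
        m = bs.foldl (fun x b => 2 * x + b) a := by
  intro ks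
  induction ks with
  | nil =>
    intro a m h
    refine ⟨[], .nil, ?_⟩
    simpa [entryIndexGo] using h.symm
  | cons k ks ih =>
    intro a m h
    rw [entryIndexGo] at h
    split at h
    · rename_i hget
      obtain ⟨bs, hf, hm⟩ := ih _ _ h
      refine ⟨0 :: bs, .cons ⟨hget, Or.inl rfl⟩ hf, ?_⟩
      simp only [List.foldl_cons]
      rw [hm]; norm_num
    · rename_i hget
      obtain ⟨bs, hf, hm⟩ := ih _ _ h
      exact ⟨1 :: bs, .cons ⟨hget, Or.inr rfl⟩ hf, by simp only [List.foldl_cons]; rw [hm]⟩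
    · exact absurd h (by simp)

lemma pyRange09 : PySem.List.pyRange 0 9 1 = [0,1,2,3,4,5,6,7,8] := by decide

lemma forall9 {P : Int → Int → Prop} (bs : List Int)
    (h : List.Forall₂ P [0,1,2,3,4,5,6,7,8] bs) :
    ∃ c0 c1 c2 c3 c4 c5 c6 c7 c8, bs = [c0,c1,c2,c3,c4,c5,c6,c7,c8] ∧
      P 0 c0 ∧ P 1 c1 ∧ P 2 c2 ∧ P 3 c3 ∧ P 4 c4 ∧ P 5 c5 ∧ P 6 c6 ∧ P 7 c7 ∧ P 8 c8 := by
  rcases h with _ | ⟨h0, h⟩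
  rcases h with _ | ⟨h1, h⟩
  rcases h with _ | ⟨h2, h⟩
  rcases h with _ | ⟨h3, h⟩
  rcases h with _ | ⟨h4, h⟩
  rcases h with _ | ⟨h5, h⟩
  rcases h with _ | ⟨h6, h⟩
  rcases h with _ | ⟨h7, h⟩
  rcases h with _ | ⟨h8, h⟩
  cases h
  exact ⟨_,_,_,_,_,_,_,_,_, rfl, h0,h1,h2,h3,h4,h5,h6,h7,h8⟩

lemma bit_bounds {b : Int} (h : b = 0 ∨ b = 1) : 0 ≤ b ∧ b ≤ 1 := by
  rcases h with rfl | rfl <;> norm_num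

lemma idxOf9 (b0 b1 b2 b3 b4 b5 b6 b7 b8 : Int) :
    idxOf [b0,b1,b2,b3,b4,b5,b6,b7,b8] =
      2*(2*(2*(2*(2*(2*(2*(2*(2*0+b0)+b1)+b2)+b3)+b4)+b5)+b6)+b7)+b8 := rfl

-- the per-entry indicator: A's match test against assignment bs equals B's index test
set_option maxHeartbeats 1600000 in
lemma indicator (d : PySem.Dict Int Int) (b0 b1 b2 b3 b4 b5 b6 b7 b8 : Int)
    (hb0 : b0 = 0 ∨ b0 = 1) (hb1 : b1 = 0 ∨ b1 = 1) (hb2 : b2 = 0 ∨ b2 = 1)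
    (hb3 : b3 = 0 ∨ b3 = 1) (hb4 : b4 = 0 ∨ b4 = 1) (hb5 : b5 = 0 ∨ b5 = 1)
    (hb6 : b6 = 0 ∨ b6 = 1) (hb7 : b7 = 0 ∨ b7 = 1) (hb8 : b8 = 0 ∨ b8 = 1) :
    itemRes d (dvOf [b0,b1,b2,b3,b4,b5,b6,b7,b8]) =
      if entryIndex d == some (idxOf [b0,b1,b2,b3,b4,b5,b6,b7,b8]) then 1 else 0 := by
  rw [dvOf_cons, itemRes, itemResGo_eq]
  have hkeys : (PySem.Dict.mk [((0:Int),b0),(1,b1),(2,b2),(3,b3),(4,b4),(5,b5),(6,b6),(7,b7),(8,b8)]).keys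
      = [0,1,2,3,4,5,6,7,8] := rfl
  have e0 : (PySem.Dict.mk [((0:Int),b0),(1,b1),(2,b2),(3,b3),(4,b4),(5,b5),(6,b6),(7,b7),(8,b8)]).get? 0 = some b0 := rfl
  have e1 : (PySem.Dict.mk [((0:Int),b0),(1,b1),(2,b2),(3,b3),(4,b4),(5,b5),(6,b6),(7,b7),(8,b8)]).get? 1 = some b1 := rfl
  have e2 : (PySem.Dict.mk [((0:Int),b0),(1,b1),(2,b2),(3,b3),(4,b4),(5,b5),(6,b6),(7,b7),(8,b8)]).get? 2 = some b2 := rfl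
  have e3 : (PySem.Dict.mk [((0:Int),b0),(1,b1),(2,b2),(3,b3),(4,b4),(5,b5),(6,b6),(7,b7),(8,b8)]).get? 3 = some b3 := rfl
  have e4 : (PySem.Dict.mk [((0:Int),b0),(1,b1),(2,b2),(3,b3),(4,b4),(5,b5),(6,b6),(7,b7),(8,b8)]).get? 4 = some b4 := rfl
  have e5 : (PySem.Dict.mk [((0:Int),b0),(1,b1),(2,b2),(3,b3),(4,b4),(5,b5),(6,b6),(7,b7),(8,b8)]).get? 5 = some b5 := rfl
  have e6 : (PySem.Dict.mk [((0:Int),b0),(1,b1),(2,b2),(3,b3),(4,b4),(5,b5),(6,b6),(7,b7),(8,b8)]).get? 6 = some b6 := rfl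
  have e7 : (PySem.Dict.mk [((0:Int),b0),(1,b1),(2,b2),(3,b3),(4,b4),(5,b5),(6,b6),(7,b7),(8,b8)]).get? 7 = some b7 := rfl
  have e8 : (PySem.Dict.mk [((0:Int),b0),(1,b1),(2,b2),(3,b3),(4,b4),(5,b5),(6,b6),(7,b7),(8,b8)]).get? 8 = some b8 := rfl
  rw [hkeys]
  simp only [List.all_cons, List.all_nil, e0, e1, e2, e3, e4, e5, e6, e7, e8, Bool.and_true]
  by_cases hE' : entryIndex d = some (idxOf [b0,b1,b2,b3,b4,b5,b6,b7,b8])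
  · have hE2 := hE'
    rw [entryIndex, pyRange09] at hE'
    obtain ⟨bs, hf, hm⟩ := eiGo_some d _ _ _ hE'
    obtain ⟨c0,c1,c2,c3,c4,c5,c6,c7,c8, rfl,
      ⟨g0,u0⟩,⟨g1,u1⟩,⟨g2,u2⟩,⟨g3,u3⟩,⟨g4,u4⟩,⟨g5,u5⟩,⟨g6,u6⟩,⟨g7,u7⟩,⟨g8,u8⟩⟩ :=
      forall9 bs hf
    rw [idxOf9] at hm
    simp only [List.foldl_cons, List.foldl_nil] at hm
    have w0 := bit_bounds u0; have w1 := bit_bounds u1; have w2 := bit_bounds u2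
    have w3 := bit_bounds u3; have w4 := bit_bounds u4; have w5 := bit_bounds u5
    have w6 := bit_bounds u6; have w7 := bit_bounds u7; have w8 := bit_bounds u8
    have v0 := bit_bounds hb0; have v1 := bit_bounds hb1; have v2 := bit_bounds hb2
    have v3 := bit_bounds hb3; have v4 := bit_bounds hb4; have v5 := bit_bounds hb5
    have v6 := bit_bounds hb6; have v7 := bit_bounds hb7; have v8 := bit_bounds hb8
    clear u0 u1 u2 u3 u4 u5 u6 u7 u8 hb0 hb1 hb2 hb3 hb4 hb5 hb6 hb7 hb8
    have hc : c0 = b0 ∧ c1 = b1 ∧ c2 = b2 ∧ c3 = b3 ∧ c4 = b4 ∧ c5 = b5 ∧ c6 = b6 ∧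
        c7 = b7 ∧ c8 = b8 := by omega
    obtain ⟨rfl,rfl,rfl,rfl,rfl,rfl,rfl,rfl,rfl⟩ := hc
    rw [hE2]
    simp [g0,g1,g2,g3,g4,g5,g6,g7,g8]
  · have hR : (entryIndex d == some (idxOf [b0,b1,b2,b3,b4,b5,b6,b7,b8])) = false := by
      simp [hE']
    rw [hR]
    simp only [Bool.false_eq_true, if_false]
    split
    · rename_i hq
      simp only [Bool.and_eq_true, beq_iff_eq] at hq
      obtain ⟨h0,h1,h2,h3,h4,h5,h6,h7,h8⟩ := hq
      exact absurd (by
        rw [entryIndex, pyRange09]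
        exact eiGo_match d _ _
          (.cons ⟨h0.symm, hb0⟩ (.cons ⟨h1.symm, hb1⟩ (.cons ⟨h2.symm, hb2⟩ (.cons ⟨h3.symm, hb3⟩
           (.cons ⟨h4.symm, hb4⟩ (.cons ⟨h5.symm, hb5⟩ (.cons ⟨h6.symm, hb6⟩ (.cons ⟨h7.symm, hb7⟩
           (.cons ⟨h8.symm, hb8⟩ .nil))))))))) 0) hE'
    · rfl

lemma ei_range (d : PySem.Dict Int Int) (m : Int) (h : entryIndex d = some m) :
    0 ≤ m ∧ m < 512 := by
  rw [entryIndex, pyRange09] at h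
  obtain ⟨bs, hf, hm⟩ := eiGo_some d _ _ _ h
  obtain ⟨c0,c1,c2,c3,c4,c5,c6,c7,c8, rfl,
    ⟨g0,d0⟩,⟨g1,d1⟩,⟨g2,d2⟩,⟨g3,d3⟩,⟨g4,d4⟩,⟨g5,d5⟩,⟨g6,d6⟩,⟨g7,d7⟩,⟨g8,d8⟩⟩ := forall9 bs hf
  simp only [List.foldl_cons, List.foldl_nil] at hm
  have w0 := bit_bounds d0; have w1 := bit_bounds d1; have w2 := bit_bounds d2
  have w3 := bit_bounds d3; have w4 := bit_bounds d4; have w5 := bit_bounds d5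
  have w6 := bit_bounds d6; have w7 := bit_bounds d7; have w8 := bit_bounds d8
  clear d0 d1 d2 d3 d4 d5 d6 d7 d8
  omega

-- the histogram loop of B
lemma hist_len (l : List (List (Int × Int))) :
    ∀ acc : List Int,
      (l.foldl (fun counts dic =>
        match entryIndex (PySem.Dict.mk dic) with
        | some idx => counts.set idx.toNat (counts.getD idx.toNat 0 + 1)
        | none => counts) acc).length = acc.length := by
  induction l with
  | nil => intro acc; rfl
  | cons e l ih =>
    intro acc
    rw [List.foldl_cons, ih]
    cases entryIndex (PySem.Dict.mk e) <;> simp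

lemma hist_getD (l : List (List (Int × Int))) :
    ∀ (acc : List Int) (n : Nat), n < acc.length →
      (l.foldl (fun counts dic =>
        match entryIndex (PySem.Dict.mk dic) with
        | some idx => counts.set idx.toNat (counts.getD idx.toNat 0 + 1)
        | none => counts) acc).getD n 0
      = acc.getD n 0 + (l.countP (fun e => entryIndex (PySem.Dict.mk e) == some (n : Int)) : Int) := by
  induction l with
  | nil => intro acc n _; simp
  | cons e l ih =>
    intro acc n hn
    rw [List.foldl_cons]
    cases hE : entryIndex (PySem.Dict.mk e) with
    | none =>
      rw [List.countP_cons]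
      simp only [hE]
      rw [ih acc n hn]
      simp
    | some m =>
      have hr := ei_range _ _ hE
      rw [List.countP_cons]
      simp only [hE]
      rw [ih (acc.set m.toNat (acc.getD m.toNat 0 + 1)) n (by simpa using hn)]
      by_cases hmn : m.toNat = n
      · have hsome : ((some m == some ((n : Nat) : Int))) = true := by
          simp only [beq_iff_eq, Option.some.injEq]; omega
        rw [hsome]
        have hset : (acc.set m.toNat (acc.getD m.toNat 0 + 1)).getD n 0 = acc.getD n 0 + 1 := by
          subst hmn
          rw [List.getD_eq_getElem?_getD, List.getElem?_set]
          simp [hn]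
        rw [hset]
        simp only [if_pos trivial]
        push_cast
        omega
      · have hsome : ((some m == some ((n : Nat) : Int))) = false := by
          simp only [beq_eq_false_iff_ne, ne_eq, Option.some.injEq]; omega
        rw [hsome]
        have hset : (acc.set m.toNat (acc.getD m.toNat 0 + 1)).getD n 0 = acc.getD n 0 := by
          rw [List.getD_eq_getElem?_getD, List.getElem?_set]
          simp [hmn, List.getD_eq_getElem?_getD]
        rw [hset]
        simp

-- bitLists facts
lemma bitLists_succ (k : Nat) :
    bitLists (k+1) = (bitLists k).map (fun bs => (0:Int) :: bs)
      ++ (bitLists k).map (fun bs => (1:Int) :: bs) := by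
  simp [bitLists]

lemma length_bitLists (k : Nat) : (bitLists k).length = 2 ^ k := by
  induction k with
  | zero => rfl
  | succ k ih => rw [bitLists_succ]; simp [ih]; ring

lemma mem_bitLists : ∀ (k : Nat) (bs : List Int), bs ∈ bitLists k →
    bs.length = k ∧ ∀ b ∈ bs, b = 0 ∨ b = 1 := by
  intro k
  induction k with
  | zero => intro bs h; simp [bitLists] at h; subst h; simp
  | succ k ih =>
    intro bs h
    rw [bitLists_succ] at h
    rcases List.mem_append.mp h with h | h <;>
      obtain ⟨cs, hcs, rfl⟩ := List.mem_map.mp h <;>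
      obtain ⟨hlen, hbit⟩ := ih cs hcs <;>
      refine ⟨by simp [hlen], ?_⟩ <;> intro b hb <;> rcases List.mem_cons.mp hb with rfl | hb
    · left; rfl
    · exact hbit b hb
    · right; rfl
    · exact hbit b hb

lemma foldl_shift : ∀ (bs : List Int) (a : Int),
    bs.foldl (fun x b => 2 * x + b) a
      = a * 2 ^ bs.length + bs.foldl (fun x b => 2 * x + b) 0 := by
  intro bs
  induction bs with
  | nil => intro a; simp
  | cons b bs ih =>
    intro a
    simp only [List.foldl_cons]
    rw [ih (2*a+b), ih (2*0+b), List.length_cons, pow_succ]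
    ring

lemma idx_bit : ∀ (k n : Nat), n < 2 ^ k → idxOf ((bitLists k).getD n []) = (n : Int) := by
  intro k
  induction k with
  | zero =>
    intro n h
    have : n = 0 := by omega
    subst this
    rfl
  | succ k ih =>
    intro n h
    have hlen1 : ((bitLists k).map (fun bs => (0:Int) :: bs)).length = 2 ^ k := by
      simp [length_bitLists]
    rw [bitLists_succ, List.getD_eq_getElem?_getD]
    rcases lt_or_ge n (2 ^ k) with hlt | hge
    · have hn' : n < (bitLists k).length := by rwa [length_bitLists]
      rw [List.getElem?_append_left (by omega), List.getElem?_map,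
        List.getElem?_eq_getElem hn']
      have ih' : idxOf ((bitLists k)[n]) = (n : Int) := by
        rw [← List.getD_eq_getElem (bitLists k) [] hn']
        exact ih n hlt
      simp only [Option.map_some, Option.getD_some, idxOf, List.foldl_cons] at ih' ⊢
      simpa using ih'
    · have hn2 : n - 2 ^ k < (bitLists k).length := by rw [length_bitLists]; omega
      rw [List.getElem?_append_right (by omega), List.getElem?_map]
      rw [hlen1, List.getElem?_eq_getElem hn2]
      have ih' : idxOf ((bitLists k)[n - 2 ^ k]) = ((n - 2 ^ k : Nat) : Int) := by
        rw [← List.getD_eq_getElem (bitLists k) [] hn2]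
        exact ih (n - 2 ^ k) (by omega)
      have hlenel : ((bitLists k)[n - 2 ^ k]).length = k :=
        (mem_bitLists k _ (List.getElem_mem hn2)).1
      simp only [Option.map_some, Option.getD_some, idxOf, List.foldl_cons] at ih' ⊢
      rw [foldl_shift, hlenel]
      have hcast : ((n - 2 ^ k : Nat) : Int) = (n : Int) - 2 ^ k := by
        have h2k : (2:Int) ^ k = ((2 ^ k : Nat) : Int) := by push_cast; ring
        rw [h2k]
        omega
      rw [hcast] at ih'
      rw [ih']
      ring

lemma list9 (bs : List Int) (h : bs.length = 9) :
    ∃ b0 b1 b2 b3 b4 b5 b6 b7 b8, bs = [b0,b1,b2,b3,b4,b5,b6,b7,b8] := by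
  rcases bs with _ | ⟨b0, bs⟩; · simp at h
  rcases bs with _ | ⟨b1, bs⟩; · simp at h
  rcases bs with _ | ⟨b2, bs⟩; · simp at h
  rcases bs with _ | ⟨b3, bs⟩; · simp at h
  rcases bs with _ | ⟨b4, bs⟩; · simp at h
  rcases bs with _ | ⟨b5, bs⟩; · simp at h
  rcases bs with _ | ⟨b6, bs⟩; · simp at h
  rcases bs with _ | ⟨b7, bs⟩; · simp at h
  rcases bs with _ | ⟨b8, bs⟩; · simp at h
  rcases bs with _ | ⟨b9, bs⟩
  · exact ⟨b0,b1,b2,b3,b4,b5,b6,b7,b8, rfl⟩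
  · simp at h

lemma B_eq_map (l : List (List (Int × Int))) :
    NineTruthTable_alt l = (bitLists 9).map (fun bs =>
      PySem.Int.mod ((l.countP (fun e => entryIndex (PySem.Dict.mk e) == some (idxOf bs)) : Int)) 2) := by
  simp only [NineTruthTable_alt]
  apply List.ext_getElem
  · rw [List.length_map, List.length_map, hist_len l, List.length_replicate, length_bitLists]
    norm_num
  · intro n h1 h2
    have hn : n < 512 := by
      rw [List.length_map, length_bitLists] at h2
      norm_num at h2
      exact h2
    have hn9 : n < (bitLists 9).length := by rw [length_bitLists]; norm_num; exact hn
    rw [List.getElem_map, List.getElem_map]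
    have hidx : idxOf ((bitLists 9)[n]'hn9) = (n : Int) := by
      rw [← List.getD_eq_getElem (bitLists 9) [] hn9]
      exact idx_bit 9 n (by norm_num; exact hn)
    rw [hidx]
    have hlenh : n < (l.foldl (fun counts dic =>
        match entryIndex (PySem.Dict.mk dic) with
        | some idx => counts.set idx.toNat (counts.getD idx.toNat 0 + 1)
        | none => counts) (List.replicate 512 (0:Int))).length := by
      rw [hist_len l, List.length_replicate]
      exact hn
    have hget : (l.foldl (fun counts dic =>
        match entryIndex (PySem.Dict.mk dic) with
        | some idx => counts.set idx.toNat (counts.getD idx.toNat 0 + 1)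
        | none => counts) (List.replicate 512 (0:Int)))[n]'hlenh
        = (l.countP (fun e => entryIndex (PySem.Dict.mk e) == some (n : Int)) : Int) := by
      rw [← List.getD_eq_getElem _ (0:Int) hlenh,
        hist_getD l (List.replicate 512 (0:Int)) n (by rw [List.length_replicate]; exact hn),
        List.getD_eq_getElem _ (0:Int) (by rw [List.length_replicate]; exact hn),
        List.getElem_replicate, zero_add]
    rw [hget]

-- ===== VERDICT (by name: the statement is the Claim_ definition above) =====
theorem NineTruthTable_spec : Claim_equal_NineTruthTable := by
  intro l _
  show NineTruthTable l = NineTruthTable_alt l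
  rw [A_eq_map2, B_eq_map]
  apply List.map_congr_left
  intro bs hbs
  obtain ⟨hlen, hbit⟩ := mem_bitLists 9 bs hbs
  obtain ⟨b0,b1,b2,b3,b4,b5,b6,b7,b8, rfl⟩ := list9 bs hlen
  congr 1
  have hmap : l.map (fun e => itemRes (PySem.Dict.mk e) (dvOf [b0,b1,b2,b3,b4,b5,b6,b7,b8]))
      = l.map (fun e => if (entryIndex (PySem.Dict.mk e)
          == some (idxOf [b0,b1,b2,b3,b4,b5,b6,b7,b8])) then 1 else 0) := by
    apply List.map_congr_left
    intro e _
    exact indicator (PySem.Dict.mk e) b0 b1 b2 b3 b4 b5 b6 b7 b8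
      (hbit b0 (by simp)) (hbit b1 (by simp)) (hbit b2 (by simp)) (hbit b3 (by simp))
      (hbit b4 (by simp)) (hbit b5 (by simp)) (hbit b6 (by simp)) (hbit b7 (by simp))
      (hbit b8 (by simp))
  rw [hmap, PySem.List.sum_map_ite_one_zero]
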